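-- pv_equiv track=rewrite | github.com/artiedins/lt1_training | hrv_to_markdown.py | time_in_bands
-- ===== SOURCE A (Python) =====
-- ZONE_BANDS = [
--     ("below_target", 0, 118, "below target"),
--     ("true_z2", 118, 126, "true Z2 (target)"),
--     ("mild_overshoot", 126, 141, "mild overshoot"),
--     ("significant_overshoot", 141, 153, "significant overshoot (VT2 territory)"),
--     ("above_vt2", 153, 999, "above VT2"),
-- ]
--
-- def time_in_bands(hrs):
--     counts = {name: 0 for name, _, _, _ in ZONE_BANDS}
--     for h in hrs:
--         for name, lo, hi, _ in ZONE_BANDS: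
--             if lo <= h < hi:
--                 counts[name] += 1
--                 break
--     return counts
-- ===== SOURCE B (Python) =====
-- # Boundary-table + hand-written binary search instead of scanning ZONE_BANDS with break.
-- _BOUNDS = [118, 126, 141, 153]
-- _NAMES = ["below_target", "true_z2", "mild_overshoot",
--           "significant_overshoot", "above_vt2"]
--
-- def time_in_bands(hrs):
--     counts = {name: 0 for name in _NAMES}
--     for h in hrs:
--         if 0 <= h < 999:
--             lo, hi = 0, 4
--             while lo < hi:
--                 mid = (lo + hi) // 2
--                 if h < _BOUNDS[mid]:
--                     hi = mid
--                 else: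
--                     lo = mid + 1
--             counts[_NAMES[lo]] += 1
--     return counts
-- ===== Notes on version B (the rewrite author's own statement) =====
-- stated objective: alternative
-- what changed: Replaces the per-element scan over ZONE_BANDS with a break by a 0<=h<999 range guard plus a binary search over a sorted table of the four interior band boundaries that indexes a parallel band-name list.
import Mathlib
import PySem

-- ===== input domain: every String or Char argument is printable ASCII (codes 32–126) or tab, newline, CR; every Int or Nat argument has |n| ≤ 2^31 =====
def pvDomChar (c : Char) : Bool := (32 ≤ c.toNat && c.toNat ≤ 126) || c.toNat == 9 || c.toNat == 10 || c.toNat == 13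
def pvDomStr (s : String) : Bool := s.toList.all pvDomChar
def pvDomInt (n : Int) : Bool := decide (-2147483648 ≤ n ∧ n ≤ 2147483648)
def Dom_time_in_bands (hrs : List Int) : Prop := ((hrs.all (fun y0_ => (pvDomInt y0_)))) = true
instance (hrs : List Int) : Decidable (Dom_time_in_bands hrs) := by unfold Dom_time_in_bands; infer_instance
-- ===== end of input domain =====

-- B replaces A's per-element ZONE_BANDS scan-with-break by a range guard plus a
-- binary search over a sorted boundary table (alternative data structure, same cost class).


-- ===== PORT A =====
def zoneBands : List (String × Int × Int × String) := [
  ("below_target", 0, 118, "below target"),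
  ("true_z2", 118, 126, "true Z2 (target)"),
  ("mild_overshoot", 126, 141, "mild overshoot"),
  ("significant_overshoot", 141, 153, "significant overshoot (VT2 territory)"),
  ("above_vt2", 153, 999, "above VT2")]

-- the inner `for … break` loop of A: first band with lo <= h < hi gets += 1
def innerScan (d : PySem.Dict String Int) (h : Int) :
    List (String × Int × Int × String) → PySem.Dict String Int
  | [] => d
  | (name, lo, hi, _) :: rest =>
      if lo ≤ h ∧ h < hi then d.modify name 0 (· + 1) else innerScan d h rest

def time_in_bands (hrs : List Int) : List (String × Int) :=
  (hrs.foldl (fun d h => innerScan d h zoneBands)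
    (zoneBands.foldl (fun d p => d.insert p.1 0) PySem.Dict.empty)).items

-- ===== PORT B =====
def bBounds : List Int := [118, 126, 141, 153]
def bNames : List String :=
  ["below_target", "true_z2", "mild_overshoot", "significant_overshoot", "above_vt2"]

-- the `while lo < hi` binary search of Source B (indexing _BOUNDS[mid] is always in range);
-- the fuel argument hi - lo only makes the loop structurally total, it never runs out first
def bsrAux : Nat → Int → Nat → Nat → Nat
  | 0, _, lo, _ => lo
  | fuel + 1, h, lo, hi =>
    if lo < hi then
      if h < bBounds.getD ((lo + hi) / 2) 0 then bsrAux fuel h lo ((lo + hi) / 2)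
      else bsrAux fuel h ((lo + hi) / 2 + 1) hi
    else lo

def bsr (h : Int) (lo hi : Nat) : Nat := bsrAux (hi - lo) h lo hi

def time_in_bands_alt (hrs : List Int) : List (String × Int) :=
  (hrs.foldl
    (fun d h =>
      if 0 ≤ h ∧ h < 999 then d.modify (bNames.getD (bsr h 0 4) "") 0 (· + 1) else d)
    (bNames.foldl (fun d n => d.insert n 0) PySem.Dict.empty)).items

-- ===== PRECONDITION & SPEC =====
def Spec_time_in_bands (hrs : List Int) (out : List (String × Int)) : Prop := out = time_in_bands_alt hrs
instance (hrs : List Int) (out : List (String × Int)) : Decidable (Spec_time_in_bands hrs out) := by unfold Spec_time_in_bands; infer_instance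

-- ===== CLAIM (what is proved, stated in full; the proofs are below) =====
def Claim_equal_time_in_bands : Prop := ∀ (hrs : List Int), Dom_time_in_bands hrs → Spec_time_in_bands hrs (time_in_bands hrs)

-- ===== LEMMAS AND PROOFS =====

theorem bsr04 (h : Int) :
    bsr h 0 4 = if h < 141 then (if h < 126 then (if h < 118 then 0 else 1) else 2)
                else (if h < 153 then 3 else 4) := rfl

-- per-element step functions agree
theorem step_eq (d : PySem.Dict String Int) (h : Int) :
    innerScan d h zoneBands =
      (if 0 ≤ h ∧ h < 999 then d.modify (bNames.getD (bsr h 0 4) "") 0 (· + 1) else d) := by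
  simp only [zoneBands, innerScan, bsr04, bNames]
  split_ifs <;> first | rfl | omega

theorem foldl_step_eq (l : List Int) (d : PySem.Dict String Int) :
    l.foldl (fun d h => innerScan d h zoneBands) d =
      l.foldl
        (fun d h =>
          if 0 ≤ h ∧ h < 999 then d.modify (bNames.getD (bsr h 0 4) "") 0 (· + 1) else d) d := by
  induction l generalizing d with
  | nil => rfl
  | cons x xs ih => simp only [List.foldl, step_eq]

-- ===== VERDICT (by name: the statement is the Claim_ definition above) =====
theorem time_in_bands_spec : Claim_equal_time_in_bands := by
  intro hrs _
  unfold Spec_time_in_bands time_in_bands time_in_bands_alt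
  rw [foldl_step_eq]
  rfl
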